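-- pv_equiv track=rewrite | github.com/williamzujkowski/williamzujkowski.github.io | scripts/link-validation/link-manager.py | _group_repairs_by_file
-- ===== SOURCE A (Python) =====
-- from typing import Dict, List, Optional, Tuple, Any
--
-- def _group_repairs_by_file(repairs: List[Dict]) -> Dict[str, List[Dict]]:
--     """Group repairs by source file"""
--     # This would need links.json to map repairs to files
--     # Simplified implementation
--     repairs_by_file = {}
--     for repair in repairs:
--         file_path = repair.get('file_path', 'unknown')
--         if file_path not in repairs_by_file:
--             repairs_by_file[file_path] = []
--         repairs_by_file[file_path].append(repair)
--     return repairs_by_file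
-- ===== SOURCE B (Python) =====
-- def _group_repairs_by_file(repairs):
--     """Group repairs by source file (two-pass: distinct keys, then filter per key)"""
--     keys = list(dict.fromkeys(r.get('file_path', 'unknown') for r in repairs))
--     return {k: [r for r in repairs if r.get('file_path', 'unknown') == k] for k in keys}
-- ===== Notes on version B (the rewrite author's own statement) =====
-- stated objective: alternative
-- what changed: Replaces A's single-pass mutable-dict accumulation with a two-pass strategy: first collect the distinct file_path keys in encounter order, then build each group by filtering the input list per key.
import Mathlib
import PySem

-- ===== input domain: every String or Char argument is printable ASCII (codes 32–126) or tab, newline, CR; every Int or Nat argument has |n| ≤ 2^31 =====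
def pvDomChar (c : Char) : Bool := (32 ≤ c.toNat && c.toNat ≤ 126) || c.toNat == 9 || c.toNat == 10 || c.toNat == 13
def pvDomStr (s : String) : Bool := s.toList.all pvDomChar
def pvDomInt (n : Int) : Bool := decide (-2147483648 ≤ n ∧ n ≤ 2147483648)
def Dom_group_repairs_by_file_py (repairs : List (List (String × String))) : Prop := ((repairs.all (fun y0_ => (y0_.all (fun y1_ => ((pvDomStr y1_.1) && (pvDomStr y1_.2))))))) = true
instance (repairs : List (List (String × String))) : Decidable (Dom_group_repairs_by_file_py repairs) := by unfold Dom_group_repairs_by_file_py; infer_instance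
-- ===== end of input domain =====

-- B groups by first collecting the distinct file_path keys and then filtering the input per key,
-- instead of A's single-pass dict accumulation; return values are identical (alternative, not faster).

-- repair.get('file_path', 'unknown')  (used by both Pythons verbatim)
def pvKeyOf (repair : List (String × String)) : String :=
  (PySem.Dict.mk repair).getD "file_path" "unknown"

-- ===== PORT A =====
def group_repairs_by_file_py (repairs : List (List (String × String))) : List (String × List (List (String × String))) :=
  (repairs.foldl
    (fun d repair =>
      let file_path := pvKeyOf repair
      let d := if d.contains file_path then d else d.insert file_path []
      d.modify file_path [] (· ++ [repair]))
    PySem.Dict.empty).items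

-- ===== PORT B =====
def group_repairs_by_file_py_alt (repairs : List (List (String × String))) : List (String × List (List (String × String))) :=
  (PySem.Set.ofList (repairs.map pvKeyOf)).map
    (fun k => (k, repairs.filter (fun r => pvKeyOf r == k)))

-- ===== PRECONDITION & SPEC =====
def Spec_group_repairs_by_file_py (repairs : List (List (String × String))) (out : List (String × List (List (String × String)))) : Prop := out = group_repairs_by_file_py_alt repairs
instance (repairs : List (List (String × String))) (out : List (String × List (List (String × String)))) : Decidable (Spec_group_repairs_by_file_py repairs out) := by unfold Spec_group_repairs_by_file_py; infer_instance

-- ===== CLAIM (what is proved, stated in full; the proofs are below) =====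
def Claim_equal_group_repairs_by_file_py : Prop := ∀ (repairs : List (List (String × String))), Dom_group_repairs_by_file_py repairs → Spec_group_repairs_by_file_py repairs (group_repairs_by_file_py repairs)

-- ===== LEMMAS AND PROOFS =====

-- get? on a dict literal whose key list misses k, extended by (k, v), finds v.
theorem pv_get?_mk_append {ν : Type} (l : List (String × ν)) (k : String) (v : ν)
    (hk : k ∉ l.map (·.1)) : (PySem.Dict.mk (l ++ [(k, v)])).get? k = some v := by
  induction l with
  | nil => simp [PySem.Dict.get?_mk_cons]
  | cons p t ih =>
    obtain ⟨k', v'⟩ := p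
    simp only [List.map_cons, List.mem_cons, not_or] at hk
    simp only [List.cons_append, PySem.Dict.get?_mk_cons]
    rw [if_neg (by simp only [beq_iff_eq]; exact fun he => hk.1 he.symm)]
    exact ih hk.2

-- A's loop body ("insert [] if absent, then append") is exactly dict-modify with default [].
theorem pv_step_eq (d : PySem.Dict String (List (List (String × String)))) (r : List (String × String)) :
    (let fp := pvKeyOf r
     let d' := if d.contains fp then d else d.insert fp []
     d'.modify fp [] (· ++ [r])) = d.modify (pvKeyOf r) [] (· ++ [r]) := by
  by_cases h : d.contains (pvKeyOf r) = true
  · simp [h]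
  · have h' : d.contains (pvKeyOf r) = false := by simpa using h
    have hk : pvKeyOf r ∉ d.items.map (·.1) := by
      intro hm
      exact h ((PySem.Dict.contains_iff_mem_keys d (pvKeyOf r)).mpr hm)
    simp only [h, Bool.false_eq_true, if_false]
    simp only [PySem.Dict.modify, PySem.Dict.insert, h', Bool.false_eq_true, if_false]
    have hc : (PySem.Dict.mk (d.items ++ [(pvKeyOf r, ([] : List (List (String × String))))])).contains (pvKeyOf r) = true := by
      simp [PySem.Dict.contains_eq_isSome_get?, pv_get?_mk_append _ _ _ hk]
    have hg : (PySem.Dict.mk (d.items ++ [(pvKeyOf r, ([] : List (List (String × String))))])).getD (pvKeyOf r) [] = [] := by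
      rw [PySem.Dict.getD_eq_get?_getD, pv_get?_mk_append _ _ _ hk]; rfl
    simp only [hc, if_true, hg]
    rw [PySem.Dict.getD_of_not_contains d ([] : List (List (String × String))) h']
    congr 1
    simp only [List.map_append, List.map_cons, List.map_nil]
    congr 1
    conv_rhs => rw [← List.map_id d.items]
    apply List.map_congr_left
    intro p hp
    rw [if_neg, id_def]
    simp only [beq_iff_eq]
    intro hpe
    exact hk (hpe ▸ List.mem_map_of_mem hp)
    simp

theorem pv_foldl_eq (repairs : List (List (String × String))) :
    (repairs.foldl
      (fun d repair =>
        let file_path := pvKeyOf repair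
        let d := if d.contains file_path then d else d.insert file_path []
        d.modify file_path [] (· ++ [repair]))
      PySem.Dict.empty) =
    repairs.foldl (fun d r => d.modify (pvKeyOf r) [] (· ++ [r])) PySem.Dict.empty := by
  have hf : (fun (d : PySem.Dict String (List (List (String × String)))) repair =>
        let file_path := pvKeyOf repair
        let d := if d.contains file_path then d else d.insert file_path []
        d.modify file_path [] (· ++ [repair])) =
      (fun d r => d.modify (pvKeyOf r) [] (· ++ [r])) := by
    funext d r; exact pv_step_eq d r
  rw [hf]

-- ===== VERDICT (by name: the statement is the Claim_ definition above) =====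
theorem group_repairs_by_file_py_spec : Claim_equal_group_repairs_by_file_py := by
  intro repairs _
  show group_repairs_by_file_py repairs = group_repairs_by_file_py_alt repairs
  unfold group_repairs_by_file_py group_repairs_by_file_py_alt
  rw [pv_foldl_eq]
  set D := repairs.foldl (fun d r => d.modify (pvKeyOf r) [] (· ++ [r])) PySem.Dict.empty with hD
  have hnd : D.keys.Nodup := by
    rw [hD]
    exact PySem.Dict.nodup_keys_foldl_modify_key repairs pvKeyOf [] (fun _ r => (· ++ [r])) _ PySem.Dict.nodup_keys_empty
  have hkeys : D.keys = PySem.Set.ofList (repairs.map pvKeyOf) := by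
    rw [hD, PySem.Dict.keys_foldl_modify_key]
    simp [PySem.Set.update_nil_left]
  have hget : ∀ c, D.getD c [] = repairs.filter (fun r => pvKeyOf r == c) := by
    intro c
    have := PySem.Dict.getD_foldl_modify_append (l := repairs.map (fun r => (pvKeyOf r, r)))
      (d := (PySem.Dict.empty : PySem.Dict String (List (List (String × String))))) (c := c)
    rw [List.foldl_map] at this
    simpa [hD, List.filter_map, Function.comp_def, List.map_map] using this
  rw [PySem.Dict.items_eq_map_keys D hnd [], hkeys]
  exact List.map_congr_left (fun k _ => by rw [hget k])
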